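-- pv_equiv track=rewrite | github.com/phillip055/cc.fyi | 13/difff/difff.py | format_difference
-- ===== SOURCE A (Python) =====
-- def format_difference(lines1_diff: [str], lines2_diff: [str]):
--     result = []
--     idx1, idx2 = 0, 0
--     while idx1 < len(lines1_diff) or idx2 < len(lines2_diff):
--         if idx1 < len(lines1_diff):
--             result.append(
--                 "< " + lines1_diff[idx1]
--             )
--         if idx2 < len(lines2_diff):
--             result.append(
--                 "> " + lines2_diff[idx2]
--             )
--         idx1 += 1
--         idx2 += 1
--     return result
-- ===== SOURCE B (Python) =====
-- def format_difference(lines1_diff, lines2_diff):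
--     # Closed-form placement: output position k determines its source directly.
--     # Within the zipped prefix (k < 2n) parity picks the list and k//2 the row;
--     # past it, k-n indexes the tail of the longer list.
--     n1, n2 = len(lines1_diff), len(lines2_diff)
--     n = n1 if n1 < n2 else n2
--
--     def slot(k):
--         if k < 2 * n:
--             if k % 2 == 0:
--                 return "< " + lines1_diff[k // 2]
--             return "> " + lines2_diff[k // 2]
--         if n2 < n1:
--             return "< " + lines1_diff[k - n]
--         return "> " + lines2_diff[k - n]
--
--     return [slot(k) for k in range(n1 + n2)]
-- ===== Notes on version B (the rewrite author's own statement) =====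
-- stated objective: alternative
-- what changed: Replaces A's sequential dual-index interleaving loop by a closed-form per-position formula: the output is one comprehension over output indices, where parity and k//2 locate rows inside the zipped prefix and k-n indexes the longer list's tail.
import Mathlib
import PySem

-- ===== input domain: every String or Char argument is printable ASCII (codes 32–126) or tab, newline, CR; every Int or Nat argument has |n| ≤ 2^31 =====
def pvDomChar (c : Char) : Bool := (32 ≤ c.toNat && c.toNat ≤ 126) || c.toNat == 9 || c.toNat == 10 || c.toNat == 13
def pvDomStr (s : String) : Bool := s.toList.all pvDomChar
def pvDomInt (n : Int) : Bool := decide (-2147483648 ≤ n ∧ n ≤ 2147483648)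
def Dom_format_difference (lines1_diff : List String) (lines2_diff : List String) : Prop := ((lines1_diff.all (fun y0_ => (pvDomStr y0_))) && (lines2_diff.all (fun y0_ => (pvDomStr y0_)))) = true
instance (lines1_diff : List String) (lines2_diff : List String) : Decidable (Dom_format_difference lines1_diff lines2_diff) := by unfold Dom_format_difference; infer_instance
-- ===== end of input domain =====

-- B computes each output position by a closed-form index formula (parity/k÷2 inside the
-- zipped prefix, k−n in the tail) in one comprehension over output indices, instead of
-- A's sequential dual-index interleaving loop (alternative decomposition).

-- ===== PORT A =====
-- the while loop: indices advance in lockstep; list indexing is guarded by 'idx < length', so getD is exact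
def formatLoop (l1 l2 : List String) (i1 i2 : Nat) (acc : List String) : List String :=
  if i1 < l1.length || i2 < l2.length then
    let acc1 := if i1 < l1.length then acc ++ ["< " ++ l1.getD i1 ""] else acc
    let acc2 := if i2 < l2.length then acc1 ++ ["> " ++ l2.getD i2 ""] else acc1
    formatLoop l1 l2 (i1 + 1) (i2 + 1) acc2
  else acc
termination_by (l1.length - i1) + (l2.length - i2)
decreasing_by simp only [Bool.or_eq_true, decide_eq_true_eq] at *; omega

def format_difference (lines1_diff : List String) (lines2_diff : List String) : List String :=
  formatLoop lines1_diff lines2_diff 0 0 []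

-- ===== PORT B =====
-- Source B's local 'slot': every index it receives is in range, so getD is exact;
-- k is a nonnegative range index, so Python's k//2 and k%2 are Nat division/mod
def pvSlot (lines1_diff lines2_diff : List String) (k : Nat) : String :=
  let n := if lines1_diff.length < lines2_diff.length then lines1_diff.length else lines2_diff.length
  if k < 2 * n then
    if k % 2 = 0 then "< " ++ lines1_diff.getD (k / 2) ""
    else "> " ++ lines2_diff.getD (k / 2) ""
  else if lines2_diff.length < lines1_diff.length then "< " ++ lines1_diff.getD (k - n) ""
  else "> " ++ lines2_diff.getD (k - n) ""

def format_difference_alt (lines1_diff : List String) (lines2_diff : List String) : List String :=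
  (List.range (lines1_diff.length + lines2_diff.length)).map (pvSlot lines1_diff lines2_diff)

-- ===== PRECONDITION & SPEC =====
def Spec_format_difference (lines1_diff : List String) (lines2_diff : List String) (out : List String) : Prop := out = format_difference_alt lines1_diff lines2_diff
instance (lines1_diff : List String) (lines2_diff : List String) (out : List String) : Decidable (Spec_format_difference lines1_diff lines2_diff out) := by unfold Spec_format_difference; infer_instance

-- ===== CLAIM (what is proved, stated in full; the proofs are below) =====
def Claim_equal_format_difference : Prop := ∀ (lines1_diff : List String) (lines2_diff : List String), Dom_format_difference lines1_diff lines2_diff → Spec_format_difference lines1_diff lines2_diff (format_difference lines1_diff lines2_diff)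

-- ===== LEMMAS AND PROOFS =====

-- common normal form of both ports: structural interleaving
def interleave : List String → List String → List String
  | [], [] => []
  | a :: as, [] => ("< " ++ a) :: interleave as []
  | [], b :: bs => ("> " ++ b) :: interleave [] bs
  | a :: as, b :: bs => ("< " ++ a) :: ("> " ++ b) :: interleave as bs

theorem interleave_nil_left (l : List String) :
    interleave [] l = l.map (fun b => "> " ++ b) := by
  induction l with
  | nil => simp [interleave]
  | cons b bs ih => simp [interleave, ih]

theorem interleave_nil_right (l : List String) :
    interleave l [] = l.map (fun a => "< " ++ a) := by
  induction l with
  | nil => simp [interleave]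
  | cons a as ih => simp [interleave, ih]

theorem formatLoop_eq (l1 l2 : List String) (i1 i2 : Nat) (acc : List String) :
    formatLoop l1 l2 i1 i2 acc = acc ++ interleave (l1.drop i1) (l2.drop i2) := by
  induction i1, i2, acc using formatLoop.induct l1 l2 with
  | case1 i1 i2 acc h acc1 acc2 ih =>
      rw [formatLoop, if_pos h]
      show formatLoop l1 l2 (i1 + 1) (i2 + 1) acc2 = _
      rw [ih]
      simp only [acc2, acc1, dite_eq_ite]
      simp only [Bool.or_eq_true, decide_eq_true_eq] at h
      rcases Nat.lt_or_ge i1 l1.length with h1 | h1 <;>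
      rcases Nat.lt_or_ge i2 l2.length with h2 | h2
      · rw [List.drop_eq_getElem_cons h1, List.drop_eq_getElem_cons h2, interleave]
        simp [h1, h2]
      · rw [List.drop_eq_getElem_cons h1, List.drop_eq_nil_iff.mpr h2,
            List.drop_eq_nil_iff.mpr (show l2.length ≤ i2 + 1 by omega), interleave]
        simp [h1, Nat.not_lt.mpr h2]
      · rw [List.drop_eq_getElem_cons h2, List.drop_eq_nil_iff.mpr h1,
            List.drop_eq_nil_iff.mpr (show l1.length ≤ i1 + 1 by omega), interleave]
        simp [Nat.not_lt.mpr h1, h2]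
      · omega
  | case2 i1 i2 acc h =>
      rw [formatLoop, if_neg h]
      simp only [Bool.or_eq_true, decide_eq_true_eq, not_or, Nat.not_lt] at h
      rw [List.drop_eq_nil_iff.mpr h.1, List.drop_eq_nil_iff.mpr h.2]
      simp [interleave]

-- a map over range by getD is the plain map
theorem map_range_getD (f : String → String) (l : List String) :
    (List.range l.length).map (fun k => f (l.getD k "")) = l.map f := by
  induction l with
  | nil => simp
  | cons x xs ih =>
      rw [List.length_cons, List.range_succ_eq_map]
      simp only [List.map_cons, List.map_map, Function.comp_def, List.getD_cons_succ,
        List.getD_cons_zero]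
      rw [ih]

-- shifting the slot index by two steps both lists down one
theorem pvSlot_shift (a b : String) (as bs : List String) (k : Nat) :
    pvSlot (a :: as) (b :: bs) (k + 2) = pvSlot as bs k := by
  simp only [pvSlot, List.length_cons]
  have hmin : (if as.length + 1 < bs.length + 1 then as.length + 1 else bs.length + 1)
      = (if as.length < bs.length then as.length else bs.length) + 1 := by
    split_ifs with h1 h2 h2 <;> omega
  rw [hmin]
  set n := if as.length < bs.length then as.length else bs.length with hn
  have hdiv : (k + 2) / 2 = k / 2 + 1 := by omega
  have hmod : (k + 2) % 2 = k % 2 := by omega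
  by_cases hk : k < 2 * n
  · rw [if_pos (by omega : k + 2 < 2 * (n + 1)), if_pos hk, hdiv, hmod]
    by_cases hp : k % 2 = 0 <;> simp [hp]
  · have hkn : n ≤ k := by omega
    rw [if_neg (by omega : ¬ k + 2 < 2 * (n + 1)), if_neg hk]
    have hsub : k + 2 - (n + 1) = (k - n) + 1 := by omega
    rw [hsub]
    by_cases hlt : bs.length < as.length <;>
      simp [hlt]

theorem alt_eq (l1 l2 : List String) :
    format_difference_alt l1 l2 = interleave l1 l2 := by
  induction l1 generalizing l2 with
  | nil =>
      rw [format_difference_alt, interleave_nil_left]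
      simp only [List.length_nil, Nat.zero_add]
      have : ∀ k, pvSlot [] l2 k = "> " ++ l2.getD k "" := by
        intro k
        simp only [pvSlot, List.length_nil]
        by_cases h1 : (0 : Nat) < l2.length
        · rw [if_pos h1, if_neg (by omega), if_neg (by omega)]
          simp
        · have hl : l2.length = 0 := by omega
          rw [if_neg h1, hl, if_neg (by omega), if_neg (by omega)]
          simp
      rw [show pvSlot [] l2 = fun k => "> " ++ l2.getD k "" from funext this]
      exact map_range_getD (fun s => "> " ++ s) l2
  | cons a as ih =>
      cases l2 with
      | nil =>
          rw [format_difference_alt, interleave_nil_right]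
          simp only [List.length_nil, Nat.add_zero]
          have : ∀ k, pvSlot (a :: as) [] k = "< " ++ (a :: as).getD k "" := by
            intro k
            simp only [pvSlot, List.length_nil, List.length_cons]
            rw [if_neg (show ¬ as.length + 1 < 0 by omega)]
            rw [if_neg (show ¬ k < 2 * 0 by omega),
               if_pos (show (0 : Nat) < as.length + 1 by omega)]
            simp
          rw [show pvSlot (a :: as) [] = fun k => "< " ++ (a :: as).getD k "" from funext this]
          exact map_range_getD (fun s => "< " ++ s) (a :: as)
      | cons b bs =>
          rw [format_difference_alt, interleave]
          have hlen : (a :: as).length + (b :: bs).length = as.length + bs.length + 2 := by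
            simp; omega
          rw [hlen, List.range_succ_eq_map, List.range_succ_eq_map]
          simp only [List.map_cons, List.map_map, Function.comp_def]
          have h0 : pvSlot (a :: as) (b :: bs) 0 = "< " ++ a := by
            have hp : (0 : Nat) < 2 * (if as.length + 1 < bs.length + 1 then as.length + 1 else bs.length + 1) := by
              split_ifs <;> omega
            simp only [pvSlot, List.length_cons, if_pos hp]
            simp
          have h1 : pvSlot (a :: as) (b :: bs) 1 = "> " ++ b := by
            have hn1 : (1 : Nat) < 2 * (if as.length + 1 < bs.length + 1 then as.length + 1 else bs.length + 1) := by
              split_ifs <;> omega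
            simp only [pvSlot, List.length_cons, if_pos hn1,
              if_neg (by decide : ¬ (1 : Nat) % 2 = 0)]
            simp
          rw [h0, h1]
          congr 1
          congr 1
          rw [← ih bs, format_difference_alt]
          apply List.map_congr_left
          intro k _
          show pvSlot (a :: as) (b :: bs) (k + 2) = pvSlot as bs k
          exact pvSlot_shift a b as bs k

-- ===== VERDICT (by name: the statement is the Claim_ definition above) =====
theorem format_difference_spec : Claim_equal_format_difference := by
  intro l1 l2 _
  show format_difference l1 l2 = format_difference_alt l1 l2
  rw [format_difference, formatLoop_eq, alt_eq]
  simp
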